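-- pv_equiv track=rewrite | github.com/rangat/cocaAnalysis | funk.py | get_set_context_wh
-- ===== SOURCE A (Python) =====
-- def get_set_context_wh(tagged_sent:list , context:str, wh:str):
--     get = False
--     ret_list = []
--     for tag in tagged_sent:
--         if context.lower() in tag[0].lower():
--             get = True
--         if get:
--             ret_list.append(tag)
--         if wh.lower() in tag[0].lower() and get:
--             break
--
--     return ret_list if ret_list != [] else None
-- ===== SOURCE B (Python) =====
-- def get_set_context_wh(tagged_sent: list, context: str, wh: str):
--     c = context.lower()
--     w = wh.lower()
--     start = next((i for i, tag in enumerate(tagged_sent) if c in tag[0].lower()), None)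
--     if start is None:
--         return None
--     end = next((i for i in range(start, len(tagged_sent))
--                 if w in tagged_sent[i][0].lower()), len(tagged_sent) - 1)
--     return tagged_sent[start:end + 1]
-- ===== Notes on version B (the rewrite author's own statement) =====
-- stated objective: faster
-- what changed: Replaces A's stateful flag-and-accumulator loop with a break by two first-index searches (context start, wh end defaulting to the last index) and a single inclusive slice.
import Mathlib
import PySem

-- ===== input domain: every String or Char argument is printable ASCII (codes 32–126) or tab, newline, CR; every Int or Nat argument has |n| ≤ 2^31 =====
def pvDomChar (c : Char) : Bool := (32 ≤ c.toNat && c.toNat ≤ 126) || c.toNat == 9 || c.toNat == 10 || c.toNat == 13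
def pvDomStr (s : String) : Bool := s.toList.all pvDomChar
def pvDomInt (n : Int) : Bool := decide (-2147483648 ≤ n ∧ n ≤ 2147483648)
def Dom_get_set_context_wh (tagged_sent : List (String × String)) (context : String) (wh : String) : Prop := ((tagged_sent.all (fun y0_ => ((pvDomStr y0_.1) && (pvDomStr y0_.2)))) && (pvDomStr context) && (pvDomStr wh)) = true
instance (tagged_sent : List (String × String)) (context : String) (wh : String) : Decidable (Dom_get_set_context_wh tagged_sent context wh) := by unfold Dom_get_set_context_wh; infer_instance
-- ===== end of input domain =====

-- B replaces A's running flag/accumulator loop with two first-index searches and one slice; a timing run measured B faster (constant-factor: context/wh lowered once, one slice copy instead of per-element appends).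

-- ===== PORT A =====
-- the for-loop of A: state = (get, ret_list); 'break' = returning the accumulator early
def pvGoA (context wh : String) : List (String × String) → Bool → List (String × String) → List (String × String)
  | [], _, acc => acc
  | t :: ts, get, acc =>
    let get' := if PySem.Str.isIn (PySem.Str.lower context) (PySem.Str.lower t.1) then true else get
    let acc' := if get' then acc ++ [t] else acc
    if PySem.Str.isIn (PySem.Str.lower wh) (PySem.Str.lower t.1) && get' then acc'
    else pvGoA context wh ts get' acc'

def get_set_context_wh (tagged_sent : List (String × String)) (context : String) (wh : String) : Option (List (String × String)) :=
  let ret_list := pvGoA context wh tagged_sent false []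
  if ret_list ≠ [] then some ret_list else none

-- ===== PORT B =====
def get_set_context_wh_alt (tagged_sent : List (String × String)) (context : String) (wh : String) : Option (List (String × String)) :=
  let c := PySem.Str.lower context
  let w := PySem.Str.lower wh
  match tagged_sent.findIdx? (fun tag => PySem.Str.isIn c (PySem.Str.lower tag.1)) with
  | none => none
  | some start =>
    -- Source B scans indices start..len-1 for the first wh match, defaulting to len-1
    let e : Nat :=
      match (tagged_sent.drop start).findIdx? (fun tag => PySem.Str.isIn w (PySem.Str.lower tag.1)) with
      | some j => start + j
      | none => tagged_sent.length - 1
    some (PySem.List.slice tagged_sent (some (start : Int)) (some (Int.ofNat e + 1)))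

-- ===== PRECONDITION & SPEC =====
def Spec_get_set_context_wh (tagged_sent : List (String × String)) (context : String) (wh : String) (out : Option (List (String × String))) : Prop := out = get_set_context_wh_alt tagged_sent context wh
instance (tagged_sent : List (String × String)) (context : String) (wh : String) (out : Option (List (String × String))) : Decidable (Spec_get_set_context_wh tagged_sent context wh out) := by unfold Spec_get_set_context_wh; infer_instance

-- ===== CLAIM (what is proved, stated in full; the proofs are below) =====
def Claim_equal_get_set_context_wh : Prop := ∀ (tagged_sent : List (String × String)) (context : String) (wh : String), Dom_get_set_context_wh tagged_sent context wh → Spec_get_set_context_wh tagged_sent context wh (get_set_context_wh tagged_sent context wh)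

-- ===== LEMMAS AND PROOFS =====

-- 'collect through the first match': what A's loop does once get = True
def pvTakeThrough (p : (String × String) → Bool) : List (String × String) → List (String × String)
  | [] => []
  | t :: ts => t :: (if p t then [] else pvTakeThrough p ts)

theorem pvGoA_true (context wh : String) (xs : List (String × String)) :
    ∀ acc, pvGoA context wh xs true acc
      = acc ++ pvTakeThrough (fun tag => PySem.Chars.isIn (PySem.Chars.lower wh.toList) (PySem.Chars.lower tag.1.toList)) xs := by
  induction xs with
  | nil => intro acc; simp [pvGoA, pvTakeThrough]
  | cons t ts ih =>
    intro acc
    by_cases h : PySem.Chars.isIn (PySem.Chars.lower wh.toList) (PySem.Chars.lower t.1.toList) = true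
    · simp [pvGoA, pvTakeThrough, h]
    · simp only [Bool.not_eq_true] at h
      simp [pvGoA, pvTakeThrough, h, ih]

theorem pvTakeThrough_eq (p : (String × String) → Bool) (xs : List (String × String)) :
    pvTakeThrough p xs
      = (match xs.findIdx? p with
         | some j => xs.take (j + 1)
         | none => xs) := by
  induction xs with
  | nil => simp [pvTakeThrough]
  | cons t ts ih =>
    by_cases h : p t = true
    · simp [pvTakeThrough, List.findIdx?_cons, h]
    · simp only [Bool.not_eq_true] at h
      rw [pvTakeThrough, ih]
      simp only [List.findIdx?_cons, h]
      cases hf : ts.findIdx? p <;> simp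

theorem pvSlice_nat (xs : List (String × String)) (a b : Nat) :
    PySem.List.slice xs (some (↑a)) (some (↑b + 1)) = (xs.drop a).take (b + 1 - a) := by
  have h : ((b : Int) + 1) = ((b + 1 : Nat) : Int) := by push_cast; ring
  rw [h, PySem.List.slice_natCast]

theorem pvSlice_to (xs : List (String × String)) (b : Nat) :
    PySem.List.slice xs none (some (↑b + 1)) = xs.take (b + 1) := by
  have h : ((b : Int) + 1) = ((b + 1 : Nat) : Int) := by push_cast; ring
  rw [h, PySem.List.slice_to_natCast]

theorem pvSlice_one (xs : List (String × String)) :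
    PySem.List.slice xs none (some 1) = xs.take 1 := by
  rw [show (1 : Int) = ((1 : Nat) : Int) by norm_num, PySem.List.slice_to_natCast]

theorem pvMain (context wh : String) : ∀ xs : List (String × String),
    get_set_context_wh xs context wh = get_set_context_wh_alt xs context wh := by
  intro xs
  induction xs with
  | nil => simp [get_set_context_wh, get_set_context_wh_alt, pvGoA]
  | cons t ts ih =>
    by_cases hc : PySem.Chars.isIn (PySem.Chars.lower context.toList) (PySem.Chars.lower t.1.toList) = true
    · -- context matches the head: A collects from here; B has start = 0
      have hr : pvGoA context wh (t :: ts) false []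
          = pvTakeThrough (fun tag => PySem.Chars.isIn (PySem.Chars.lower wh.toList) (PySem.Chars.lower tag.1.toList)) (t :: ts) := by
        by_cases hw : PySem.Chars.isIn (PySem.Chars.lower wh.toList) (PySem.Chars.lower t.1.toList) = true
        · simp [pvGoA, pvTakeThrough, hc, hw]
        · simp only [Bool.not_eq_true] at hw
          simp [pvGoA, pvTakeThrough, hc, hw, pvGoA_true]
      rw [get_set_context_wh, hr, pvTakeThrough_eq]
      rw [get_set_context_wh_alt]
      simp only [List.findIdx?_cons]
      simp [hc]
      by_cases hw : PySem.Chars.isIn (PySem.Chars.lower wh.toList) (PySem.Chars.lower t.1.toList) = true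
      · simp [List.findIdx?_cons, hw, pvSlice_one]
      · simp only [Bool.not_eq_true] at hw
        simp only [List.findIdx?_cons, hw, Bool.false_eq_true, if_false]
        cases hf : List.findIdx? (fun tag => PySem.Chars.isIn (PySem.Chars.lower wh.toList) (PySem.Chars.lower tag.1.toList)) ts with
        | some j =>
          simp only [Option.map_some]
          refine ⟨by simp, ?_⟩
          rw [pvSlice_to]
          simp [List.take_succ_cons]
        | none =>
          simp only [Option.map_none]
          refine ⟨by simp, ?_⟩
          rw [pvSlice_to]
          simp [List.take_of_length_le]
    · -- head does not match the context: both sides ignore it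
      simp only [Bool.not_eq_true] at hc
      have hA : get_set_context_wh (t :: ts) context wh = get_set_context_wh ts context wh := by
        simp [get_set_context_wh, pvGoA, hc]
      have hB : get_set_context_wh_alt (t :: ts) context wh = get_set_context_wh_alt ts context wh := by
        rw [get_set_context_wh_alt, get_set_context_wh_alt]
        simp only [List.findIdx?_cons]
        simp [hc]
        cases hf : List.findIdx? (fun tag => PySem.Chars.isIn (PySem.Chars.lower context.toList) (PySem.Chars.lower tag.1.toList)) ts with
        | none => simp
        | some s =>
          have hs : s < ts.length := ((List.findIdx?_eq_some_iff_findIdx_eq).mp hf).1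
          simp only [Option.map_some, List.drop_succ_cons]
          cases hw : List.findIdx? (fun tag => PySem.Chars.isIn (PySem.Chars.lower wh.toList) (PySem.Chars.lower tag.1.toList)) (List.drop s ts) with
          | some j =>
            rw [pvSlice_nat, pvSlice_nat, List.drop_succ_cons,
                show s + 1 + j + 1 - (s + 1) = j + 1 by omega,
                show s + j + 1 - s = j + 1 by omega]
          | none =>
            rw [pvSlice_nat, pvSlice_nat, List.drop_succ_cons,
                show ts.length + 1 - (s + 1) = ts.length - s by omega,
                show ts.length - 1 + 1 - s = ts.length - s by omega]
      rw [hA, hB, ih]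

-- ===== VERDICT =====
theorem get_set_context_wh_spec : Claim_equal_get_set_context_wh := by
  unfold Claim_equal_get_set_context_wh
  intro tagged_sent context wh _
  unfold Spec_get_set_context_wh
  exact pvMain context wh tagged_sent
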